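-- pv_equiv track=rewrite | github.com/Dakskihedron/advent-of-code | 2022/day-15.py | calc_positions
-- ===== SOURCE A (Python) =====
-- def calc_positions(level, data):
--     occupied = [x for y in data for x in y if x[1] == level]
--     positions = set()
--
--     for i in data:
--         sensor = i[0]
--         beacon = i[1]
--         dist = abs(sensor[0] - beacon[0]) + abs(sensor[1] - beacon[1])
--
--         if level <= sensor[1] + dist and level >= sensor[1] - dist:
--             offset = abs(level - sensor[1])
--             minx = sensor[0] - dist + offset
--             maxx = sensor[0] + dist - offset
--
--             for x in [*range(minx, maxx + 1)]:
--                 pos = (x, level)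
--                 if pos not in occupied:
--                     positions.add(pos)
--
--     return positions
-- ===== SOURCE B (Python) =====
-- def calc_positions(level, data):
--     occ = {p[0] for pair in data for p in pair if p[1] == level}
--     out = []
--     covered = []  # disjoint, strictly separated intervals, sorted by start
--     for i in data:
--         sensor = i[0]
--         beacon = i[1]
--         dist = abs(sensor[0] - beacon[0]) + abs(sensor[1] - beacon[1])
--         offset = abs(level - sensor[1])
--         if offset <= dist:
--             lo = sensor[0] - (dist - offset)
--             hi = sensor[0] + (dist - offset)
--             for g in gaps(covered, lo, hi):
--                 out.extend((x, level) for x in range(g[0], g[1] + 1) if x not in occ)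
--             covered = insert_interval(covered, lo, hi)
--     return set(out)
--
--
-- def gaps(covered, lo, hi):
--     """Sub-intervals of [lo, hi] not covered by the sorted interval list."""
--     if not covered:
--         return [(lo, hi)] if lo <= hi else []
--     (a, b), rest = covered[0], covered[1:]
--     if hi < a:
--         return [(lo, hi)] if lo <= hi else []
--     if b < lo:
--         return gaps(rest, lo, hi)
--     head = [(lo, a - 1)] if lo <= a - 1 else []
--     return head + gaps(rest, b + 1, hi)
--
--
-- def insert_interval(covered, lo, hi):
--     """Insert [lo, hi] into the sorted separated interval list, merging."""
--     if not covered: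
--         return [(lo, hi)]
--     (a, b), rest = covered[0], covered[1:]
--     if b + 1 < lo:
--         return [(a, b)] + insert_interval(rest, lo, hi)
--     if hi + 1 < a:
--         return [(lo, hi)] + covered
--     return insert_interval(rest, min(a, lo), max(b, hi))
-- ===== Notes on version B (the rewrite author's own statement) =====
-- stated objective: alternative
-- what changed: A tests every x of every sensor's row-interval against the occupied list and the growing result set; B merges sensor x-intervals into a sorted separated interval list and emits each sensor's not-yet-covered gaps once, with occupied x-coordinates in a hash set.
-- outside the precondition, e.g. on calc_positions(5, [((1, 5),)]): A raises IndexError, B raises IndexError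
import Mathlib
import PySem

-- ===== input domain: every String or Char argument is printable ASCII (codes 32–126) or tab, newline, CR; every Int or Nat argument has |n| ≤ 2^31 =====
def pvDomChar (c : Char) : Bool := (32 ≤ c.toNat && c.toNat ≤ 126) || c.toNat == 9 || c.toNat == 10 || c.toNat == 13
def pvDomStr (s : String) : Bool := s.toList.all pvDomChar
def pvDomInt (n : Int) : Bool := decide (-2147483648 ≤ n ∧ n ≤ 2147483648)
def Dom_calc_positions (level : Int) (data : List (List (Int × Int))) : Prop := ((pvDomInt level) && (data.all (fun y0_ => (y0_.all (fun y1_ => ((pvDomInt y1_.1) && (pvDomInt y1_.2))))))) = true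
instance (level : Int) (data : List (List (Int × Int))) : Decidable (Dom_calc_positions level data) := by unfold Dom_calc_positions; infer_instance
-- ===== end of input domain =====

-- B replaces A's per-x scans of the occupied list and of the growing result set by a
-- sorted merged-interval structure: each sensor contributes only its not-yet-covered
-- gaps, emitted once, with occupied x-coordinates kept in a set (objective: alternative
-- algorithm; a timing run could not measure a speed difference on its inputs).

-- ===== PORT A =====
def pvStepA (level : Int) (occupied : List (Int × Int)) (positions : PySem.Set (Int × Int)) (i : List (Int × Int)) : PySem.Set (Int × Int) :=
  let sensor := PySem.List.pyGetD i 0 (0, 0)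
  let beacon := PySem.List.pyGetD i 1 (0, 0)
  let dist := |sensor.1 - beacon.1| + |sensor.2 - beacon.2|
  if level ≤ sensor.2 + dist ∧ sensor.2 - dist ≤ level then
    let offset := |level - sensor.2|
    let minx := sensor.1 - dist + offset
    let maxx := sensor.1 + dist - offset
    (PySem.List.pyRange minx (maxx + 1) 1).foldl
      (fun pos x => if (x, level) ∈ occupied then pos else PySem.Set.add pos (x, level)) positions
  else positions

def calc_positions (level : Int) (data : List (List (Int × Int))) : List (Int × Int) :=
  let occupied : List (Int × Int) := data.flatMap (fun y => y.filter (fun x => x.2 == level))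
  data.foldl (pvStepA level occupied) PySem.Set.empty

-- ===== PORT B =====
-- sub-intervals of [lo, hi] not covered by the sorted separated interval list
def pvGaps : List (Int × Int) → Int → Int → List (Int × Int)
  | [], lo, hi => if lo ≤ hi then [(lo, hi)] else []
  | (a, b) :: rest, lo, hi =>
    if hi < a then (if lo ≤ hi then [(lo, hi)] else [])
    else if b < lo then pvGaps rest lo hi
    else (if lo ≤ a - 1 then [(lo, a - 1)] else []) ++ pvGaps rest (b + 1) hi

-- insert [lo, hi] into the sorted separated interval list, merging overlaps
def pvInsert : List (Int × Int) → Int → Int → List (Int × Int)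
  | [], lo, hi => [(lo, hi)]
  | (a, b) :: rest, lo, hi =>
    if b + 1 < lo then (a, b) :: pvInsert rest lo hi
    else if hi + 1 < a then (lo, hi) :: (a, b) :: rest
    else pvInsert rest (min a lo) (max b hi)

def pvStepB (level : Int) (occ : PySem.Set Int) (st : List (Int × Int) × List (Int × Int)) (i : List (Int × Int)) : List (Int × Int) × List (Int × Int) :=
  let sensor := PySem.List.pyGetD i 0 (0, 0)
  let beacon := PySem.List.pyGetD i 1 (0, 0)
  let dist := |sensor.1 - beacon.1| + |sensor.2 - beacon.2|
  let offset := |level - sensor.2|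
  if offset ≤ dist then
    let lo := sensor.1 - (dist - offset)
    let hi := sensor.1 + (dist - offset)
    let out := st.2 ++ (pvGaps st.1 lo hi).flatMap (fun g =>
      ((PySem.List.pyRange g.1 (g.2 + 1) 1).filter (fun x => !(PySem.Set.contains occ x))).map (fun x => (x, level)))
    (pvInsert st.1 lo hi, out)
  else st

def calc_positions_alt (level : Int) (data : List (List (Int × Int))) : List (Int × Int) :=
  let occ : PySem.Set Int := PySem.Set.ofList ((data.flatMap (fun y => y.filter (fun p => p.2 == level))).map (fun p => p.1))
  PySem.Set.ofList ((data.foldl (pvStepB level occ) ([], [])).2)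

-- ===== PRECONDITION & SPEC =====
-- A indexes i[0] and i[1] of every inner list: Pre_ excludes inner lists shorter than 2,
-- on which A raises IndexError.
def Pre_calc_positions (level : Int) (data : List (List (Int × Int))) : Prop :=
  ∀ y ∈ data, 2 ≤ y.length
instance (level : Int) (data : List (List (Int × Int))) : Decidable (Pre_calc_positions level data) := by unfold Pre_calc_positions; infer_instance

def pvWitness_calc_positions : Int × (List (List (Int × Int))) := (10, [[(8, 7), (2, 10)], [(20, 14), (25, 17)]])

def Spec_calc_positions (level : Int) (data : List (List (Int × Int))) (out : List (Int × Int)) : Prop := out = calc_positions_alt level data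
instance (level : Int) (data : List (List (Int × Int))) (out : List (Int × Int)) : Decidable (Spec_calc_positions level data out) := by unfold Spec_calc_positions; infer_instance

-- ===== CLAIM (what is proved, stated in full; the proofs are below) =====
def Claim_equal_calc_positions : Prop := ∀ (level : Int) (data : List (List (Int × Int))), Dom_calc_positions level data → Pre_calc_positions level data → Spec_calc_positions level data (calc_positions level data)

-- ===== LEMMAS AND PROOFS =====

-- x is covered by one of the intervals
def pvCovP (c : List (Int × Int)) (x : Int) : Prop := ∃ p ∈ c, p.1 ≤ x ∧ x ≤ p.2

-- well-formed interval list: nonempty intervals, sorted and strictly separated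
def pvOkCov (c : List (Int × Int)) : Prop :=
  (∀ p ∈ c, p.1 ≤ p.2) ∧ c.Pairwise (fun p q => p.2 + 1 < q.1)

def pvEmit (c : List (Int × Int)) (lo hi : Int) : List Int :=
  (pvGaps c lo hi).flatMap (fun g => PySem.List.pyRange g.1 (g.2 + 1) 1)

lemma pvCovP_cons {a b x : Int} {rest : List (Int × Int)} :
    pvCovP ((a, b) :: rest) x ↔ (a ≤ x ∧ x ≤ b) ∨ pvCovP rest x := by
  simp [pvCovP]

lemma pvCovP_false_of_lt {c : List (Int × Int)} {x k : Int}
    (h : ∀ p ∈ c, k < p.1) (hx : x ≤ k) : ¬ pvCovP c x := by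
  rintro ⟨p, hp, h1, _⟩; exact absurd (h p hp) (by omega)

lemma mem_pvEmit {c : List (Int × Int)} (h : pvOkCov c) (lo hi x : Int) :
    x ∈ pvEmit c lo hi ↔ lo ≤ x ∧ x ≤ hi ∧ ¬ pvCovP c x := by
  induction c generalizing lo with
  | nil =>
    simp only [pvEmit, pvGaps]
    split
    · simp only [List.flatMap_cons, List.flatMap_nil, List.append_nil,
        PySem.List.mem_pyRange_one, pvCovP, List.not_mem_nil]
      constructor
      · rintro ⟨h1, h2⟩; exact ⟨h1, by omega, by rintro ⟨p, hp, -⟩; exact hp⟩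
      · rintro ⟨h1, h2, -⟩; exact ⟨h1, by omega⟩
    · simp only [List.flatMap_nil, List.not_mem_nil, false_iff]
      rintro ⟨h1, h2, -⟩; omega
  | cons p rest ih =>
    obtain ⟨a, b⟩ := p
    have hab : a ≤ b := h.1 (a, b) (by simp)
    have hsep : ∀ q ∈ rest, b + 1 < q.1 := (List.pairwise_cons.1 h.2).1
    have hrest : pvOkCov rest := ⟨fun q hq => h.1 q (by simp [hq]), (List.pairwise_cons.1 h.2).2⟩
    have hP' : ∀ {y : Int}, y ≤ b + 1 → ¬ pvCovP rest y := fun hy => pvCovP_false_of_lt hsep hy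
    simp only [pvEmit, pvGaps]
    split
    · -- hi < a
      rename_i hha
      split
      · rename_i hlh
        simp only [List.flatMap_cons, List.flatMap_nil, List.append_nil,
          PySem.List.mem_pyRange_one, pvCovP_cons]
        constructor
        · rintro ⟨h1, h2⟩
          refine ⟨h1, by omega, ?_⟩
          rintro (⟨h3, h4⟩ | hr)
          · omega
          · exact hP' (by omega) hr
        · rintro ⟨h1, h2, -⟩; exact ⟨h1, by omega⟩
      · rename_i hlh
        simp only [List.flatMap_nil, List.not_mem_nil, false_iff]
        rintro ⟨h1, h2, -⟩; omega
    · split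
      · -- b < lo
        rename_i hha hbl
        rw [show (pvGaps rest lo hi).flatMap (fun g => PySem.List.pyRange g.1 (g.2 + 1) 1) = pvEmit rest lo hi from rfl,
          ih hrest]
        simp only [pvCovP_cons]
        constructor
        · rintro ⟨h1, h2, h3⟩
          exact ⟨h1, h2, by rintro (⟨h4, h5⟩ | hr); exacts [by omega, h3 hr]⟩
        · rintro ⟨h1, h2, h3⟩
          exact ⟨h1, h2, fun hr => h3 (Or.inr hr)⟩
      · -- a ≤ hi and lo ≤ b : overlap
        rename_i hha hbl
        rw [List.flatMap_append,
          show (pvGaps rest (b + 1) hi).flatMap (fun g => PySem.List.pyRange g.1 (g.2 + 1) 1) = pvEmit rest (b + 1) hi from rfl]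
        simp only [List.mem_append, ih hrest, pvCovP_cons]
        constructor
        · rintro (hhead | ⟨h1, h2, h3⟩)
          · have hmem : lo ≤ a - 1 ∧ lo ≤ x ∧ x < a - 1 + 1 := by
              by_cases hc : lo ≤ a - 1
              · rw [if_pos hc] at hhead
                simp only [List.flatMap_cons, List.flatMap_nil, List.append_nil,
                  PySem.List.mem_pyRange_one] at hhead
                exact ⟨hc, hhead⟩
              · rw [if_neg hc] at hhead; simp at hhead
            refine ⟨by omega, by omega, ?_⟩
            rintro (⟨h3, h4⟩ | hr)
            · omega
            · exact hP' (by omega) hr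
          · refine ⟨by omega, h2, ?_⟩
            rintro (⟨h4, h5⟩ | hr)
            · omega
            · exact h3 hr
        · rintro ⟨h1, h2, h3⟩
          have h4 : ¬ (a ≤ x ∧ x ≤ b) := fun hx => h3 (Or.inl hx)
          have h5 : ¬ pvCovP rest x := fun hr => h3 (Or.inr hr)
          by_cases hxa : x ≤ a - 1
          · left
            rw [if_pos (by omega)]
            simp only [List.flatMap_cons, List.flatMap_nil, List.append_nil,
              PySem.List.mem_pyRange_one]
            omega
          · right; exact ⟨by omega, h2, h5⟩

lemma pairwise_pvEmit {c : List (Int × Int)} (h : pvOkCov c) (lo hi : Int) :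
    (pvEmit c lo hi).Pairwise (· < ·) := by
  induction c generalizing lo with
  | nil =>
    simp only [pvEmit, pvGaps]
    split
    · simp only [List.flatMap_cons, List.flatMap_nil, List.append_nil]
      exact PySem.List.pairwise_lt_pyRange_one _ _
    · simp
  | cons p rest ih =>
    obtain ⟨a, b⟩ := p
    have hab : a ≤ b := h.1 (a, b) (by simp)
    have hrest : pvOkCov rest := ⟨fun q hq => h.1 q (by simp [hq]), (List.pairwise_cons.1 h.2).2⟩
    simp only [pvEmit, pvGaps]
    split
    · split
      · simp only [List.flatMap_cons, List.flatMap_nil, List.append_nil]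
        exact PySem.List.pairwise_lt_pyRange_one _ _
      · simp
    · split
      · exact ih hrest lo
      · rename_i hha hbl
        rw [List.flatMap_append, List.pairwise_append]
        refine ⟨?_, ih hrest (b + 1), ?_⟩
        · split
          · simp only [List.flatMap_cons, List.flatMap_nil, List.append_nil]
            exact PySem.List.pairwise_lt_pyRange_one _ _
          · simp
        · intro u hu v hv
          have hv' : b + 1 ≤ v := ((mem_pvEmit hrest (b + 1) hi v).1 hv).1
          have hu' : u ≤ a - 1 := by
            by_cases hc : lo ≤ a - 1
            · rw [if_pos hc] at hu
              simp only [List.flatMap_cons, List.flatMap_nil, List.append_nil,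
                PySem.List.mem_pyRange_one] at hu
              omega
            · rw [if_neg hc] at hu; simp at hu
          omega

lemma pv_eq_of_pairwise_lt {l₁ l₂ : List Int} (h₁ : l₁.Pairwise (· < ·))
    (h₂ : l₂.Pairwise (· < ·)) (h : ∀ x, x ∈ l₁ ↔ x ∈ l₂) : l₁ = l₂ := by
  exact List.Perm.eq_of_pairwise (fun a b _ _ h1 h2 => absurd h2 (not_lt.2 h1.le)) h₁ h₂
    ((List.perm_ext_iff_of_nodup (h₁.imp ne_of_lt) (h₂.imp ne_of_lt)).2 h)

lemma pvCovP_pvInsert {c : List (Int × Int)} (h : pvOkCov c) {lo hi : Int} (hlh : lo ≤ hi) (x : Int) :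
    pvCovP (pvInsert c lo hi) x ↔ pvCovP c x ∨ (lo ≤ x ∧ x ≤ hi) := by
  induction c generalizing lo hi with
  | nil => simp [pvInsert, pvCovP]
  | cons p rest ih =>
    obtain ⟨a, b⟩ := p
    have hab : a ≤ b := h.1 (a, b) (by simp)
    have hrest : pvOkCov rest := ⟨fun q hq => h.1 q (by simp [hq]), (List.pairwise_cons.1 h.2).2⟩
    simp only [pvInsert]
    split
    · rw [pvCovP_cons, pvCovP_cons, ih hrest hlh]
      tauto
    · split
      · rw [pvCovP_cons, pvCovP_cons]
        tauto
      · rename_i h1 h2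
        rw [ih hrest (by omega), pvCovP_cons]
        constructor
        · rintro (hr | ⟨h3, h4⟩)
          · tauto
          · by_cases h5 : x ≤ b
            · by_cases h6 : a ≤ x
              · exact Or.inl (Or.inl ⟨h6, h5⟩)
              · exact Or.inr ⟨by omega, by omega⟩
            · exact Or.inr ⟨by omega, by omega⟩
        · rintro ((⟨h3, h4⟩ | hr) | ⟨h3, h4⟩)
          · exact Or.inr ⟨by omega, by omega⟩
          · exact Or.inl hr
          · exact Or.inr ⟨by omega, by omega⟩

lemma pvInsert_start_lb {c : List (Int × Int)} {lo hi k : Int}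
    (h : ∀ p ∈ c, k < p.1) (hk : k < lo) : ∀ p ∈ pvInsert c lo hi, k < p.1 := by
  induction c generalizing lo hi with
  | nil =>
    intro p hp
    rw [show pvInsert [] lo hi = [(lo, hi)] from rfl, List.mem_singleton] at hp
    subst hp; exact hk
  | cons q rest ih =>
    obtain ⟨a, b⟩ := q
    intro p hp
    simp only [pvInsert] at hp
    split at hp
    · rcases List.mem_cons.1 hp with rfl | hp'
      · exact h (a, b) (by simp)
      · exact ih (fun r hr => h r (by simp [hr])) hk p hp'
    · split at hp
      · rcases List.mem_cons.1 hp with rfl | hp'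
        · exact hk
        · exact h p hp'
      · have ha : k < a := h (a, b) (by simp)
        exact ih (fun r hr => h r (by simp [hr])) (by omega) p hp

lemma pvOkCov_pvInsert {c : List (Int × Int)} (h : pvOkCov c) {lo hi : Int} (hlh : lo ≤ hi) :
    pvOkCov (pvInsert c lo hi) := by
  induction c generalizing lo hi with
  | nil =>
    refine ⟨?_, by rw [show pvInsert [] lo hi = [(lo, hi)] from rfl]; simp⟩
    intro p hp
    rw [show pvInsert [] lo hi = [(lo, hi)] from rfl, List.mem_singleton] at hp
    subst hp; exact hlh
  | cons q rest ih =>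
    obtain ⟨a, b⟩ := q
    have hab : a ≤ b := h.1 (a, b) (by simp)
    have hsep : ∀ r ∈ rest, b + 1 < r.1 := (List.pairwise_cons.1 h.2).1
    have hrest : pvOkCov rest := ⟨fun r hr => h.1 r (by simp [hr]), (List.pairwise_cons.1 h.2).2⟩
    simp only [pvInsert]
    split
    · rename_i h1
      have hrec := ih hrest hlh
      refine ⟨?_, ?_⟩
      · intro p hp
        rcases List.mem_cons.1 hp with rfl | hp'
        · exact hab
        · exact hrec.1 p hp'
      · rw [List.pairwise_cons]
        exact ⟨pvInsert_start_lb hsep (by omega), hrec.2⟩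
    · split
      · rename_i h1 h2
        refine ⟨?_, ?_⟩
        · intro p hp
          rcases List.mem_cons.1 hp with rfl | hp'
          · exact hlh
          · exact h.1 p hp'
        · rw [List.pairwise_cons]
          refine ⟨?_, h.2⟩
          intro r hr
          rcases List.mem_cons.1 hr with rfl | hr'
          · show hi + 1 < a; omega
          · show hi + 1 < r.1; have := hsep r hr'; omega
      · rename_i h1 h2
        exact ih hrest (by omega)

lemma pvOcc_snd (level : Int) (data : List (List (Int × Int))) :
    ∀ p ∈ data.flatMap (fun y => y.filter (fun x => x.2 == level)), p.2 = level := by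
  intro p hp
  simp only [List.mem_flatMap, List.mem_filter, beq_iff_eq] at hp
  exact hp.choose_spec.2.2

lemma pvOcc_mem {level x : Int} {occupied : List (Int × Int)}
    (h : ∀ p ∈ occupied, p.2 = level) :
    (x, level) ∈ occupied ↔ x ∈ occupied.map (fun p => p.1) := by
  simp only [List.mem_map]
  constructor
  · exact fun hm => ⟨(x, level), hm, rfl⟩
  · rintro ⟨p, hp, h1⟩
    have h2 := h p hp
    have : p = (x, level) := by cases p; simp_all
    exact this ▸ hp

-- the single-sensor step preserves the simulation invariant
lemma pv_step_eq (level : Int) (occupied : List (Int × Int))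
    (hocc : ∀ p ∈ occupied, p.2 = level) (i : List (Int × Int)) (hlen : 2 ≤ i.length)
    (pos covered out : List (Int × Int)) (hnd : pos.Nodup) (hout : out = pos)
    (hok : pvOkCov covered)
    (hinv : ∀ x, (x, level) ∈ pos ↔ pvCovP covered x ∧ (x, level) ∉ occupied) :
    pvStepA level occupied pos i = (pvStepB level (PySem.Set.ofList (occupied.map (fun p => p.1))) (covered, out) i).2 ∧
    (pvStepA level occupied pos i).Nodup ∧
    pvOkCov (pvStepB level (PySem.Set.ofList (occupied.map (fun p => p.1))) (covered, out) i).1 ∧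
    (∀ x, (x, level) ∈ pvStepA level occupied pos i ↔
      pvCovP (pvStepB level (PySem.Set.ofList (occupied.map (fun p => p.1))) (covered, out) i).1 x ∧ (x, level) ∉ occupied) := by
  set O := PySem.Set.ofList (occupied.map (fun p => p.1)) with hO
  obtain ⟨s, bc, t, rfl⟩ : ∃ s bc t, i = s :: bc :: t := by
    cases i with
    | nil => exact absurd hlen (by simp)
    | cons s rest =>
      cases rest with
      | nil => exact absurd hlen (by norm_num)
      | cons bc t => exact ⟨s, bc, t, rfl⟩
  have hOx : ∀ x : Int, (PySem.Set.contains O x = true) ↔ (x, level) ∈ occupied := fun x => by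
    rw [PySem.Set.contains_iff, hO, PySem.Set.mem_ofList]; exact (pvOcc_mem hocc).symm
  have hOx' : ∀ x : Int, (PySem.Set.contains O x = false) ↔ (x, level) ∉ occupied := fun x => by
    rw [← hOx x]; simp
  have hposc : ∀ y : Int × Int, (PySem.Set.contains pos y = false) ↔ y ∉ pos := fun y => by
    rw [← PySem.Set.contains_iff]; simp
  have hinj : Function.Injective (fun x : Int => (x, level)) := by
    intro u v huv; simpa using huv
  simp only [pvStepA, pvStepB, PySem.List.pyGetD_ofNat',
    List.getD_cons_succ, List.getD_cons_zero]
  set d := |s.1 - bc.1| + |s.2 - bc.2| with hd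
  set off := |level - s.2| with hoff
  by_cases hc : off ≤ d
  · -- the sensor reaches the row
    have habs : -d ≤ level - s.2 ∧ level - s.2 ≤ d := abs_le.1 (hoff ▸ hc)
    rw [if_pos (show level ≤ s.2 + d ∧ s.2 - d ≤ level by omega), if_pos hc]
    have e1 : s.1 - (d - off) = s.1 - d + off := by ring
    have e2 : s.1 + (d - off) = s.1 + d - off := by ring
    rw [e1, e2]
    set lo := s.1 - d + off with hlo
    set hi := s.1 + d - off with hhi
    have hlohi : lo ≤ hi := by omega
    have hbody : (fun (p : PySem.Set (Int × Int)) (x : Int) => if (x, level) ∈ occupied then p else PySem.Set.add p (x, level))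
        = fun p x => if (x, level) ∉ occupied then PySem.Set.add p (x, level) else p := by
      funext p x; by_cases hm : (x, level) ∈ occupied <;> simp [hm]
    have hnodupA : (((PySem.List.pyRange lo (hi + 1) 1).filter (fun x => decide ((x, level) ∉ occupied))).map (fun x : Int => (x, level))).Nodup :=
      List.Nodup.map hinj ((PySem.List.nodup_pyRange_one _ _).filter _)
    have hA : (PySem.List.pyRange lo (hi + 1) 1).foldl
          (fun p x => if (x, level) ∈ occupied then p else PySem.Set.add p (x, level)) pos
        = pos ++ (((PySem.List.pyRange lo (hi + 1) 1).filter (fun x => decide ((x, level) ∉ occupied))).filter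
            (fun x => !PySem.Set.contains pos (x, level))).map (fun x : Int => (x, level)) := by
      rw [hbody, PySem.List.foldl_ite_eq_foldl_filter, ← PySem.Set.update_map_eq_foldl_add,
        PySem.Set.update_eq_append_filter, PySem.Set.ofList_eq_self_of_nodup _ hnodupA,
        List.filter_map]
      simp [Function.comp]
    have hB : (pvGaps covered lo hi).flatMap (fun g =>
          ((PySem.List.pyRange g.1 (g.2 + 1) 1).filter (fun x => !(PySem.Set.contains O x))).map (fun x : Int => (x, level)))
        = ((pvEmit covered lo hi).filter (fun x => !(PySem.Set.contains O x))).map (fun x : Int => (x, level)) := by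
      rw [← List.map_flatMap, ← List.filter_flatMap]; rfl
    have hM : ((PySem.List.pyRange lo (hi + 1) 1).filter (fun x => decide ((x, level) ∉ occupied))).filter
          (fun x => !PySem.Set.contains pos (x, level))
        = (pvEmit covered lo hi).filter (fun x => !(PySem.Set.contains O x)) := by
      refine pv_eq_of_pairwise_lt (((PySem.List.pairwise_lt_pyRange_one _ _).filter _).filter _)
        ((pairwise_pvEmit hok lo hi).filter _) ?_
      intro x
      simp only [List.mem_filter, PySem.List.mem_pyRange_one, mem_pvEmit hok,
        Bool.not_eq_true', decide_eq_true_eq, Int.lt_add_one_iff, hposc, hOx']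
      have hx := hinv x
      tauto
    rw [hA, hB, hM]
    refine ⟨by rw [hout], ?_, pvOkCov_pvInsert hok hlohi, ?_⟩
    · rw [List.nodup_append]
      refine ⟨hnd, List.Nodup.map hinj (List.Nodup.filter _
        ((pairwise_pvEmit hok lo hi).imp fun h => ne_of_lt h)), ?_⟩
      intro a ha y hy hay
      subst hay
      obtain ⟨x, hx1, hx2⟩ := List.mem_map.1 hy
      obtain ⟨hx3, -⟩ := List.mem_filter.1 hx1
      obtain ⟨-, -, hx4⟩ := (mem_pvEmit hok lo hi x).1 hx3
      subst hx2
      exact hx4 ((hinv x).1 ha).1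
    · intro x
      rw [pvCovP_pvInsert hok hlohi]
      simp only [List.mem_append, List.mem_map, List.mem_filter, mem_pvEmit hok,
        Bool.not_eq_true', Prod.mk.injEq, hOx']
      constructor
      · rintro (hp | ⟨x', ⟨⟨hx1, hx2, hx3⟩, hx4⟩, hx5, -⟩)
        · have hxx := (hinv x).1 hp; exact ⟨Or.inl hxx.1, hxx.2⟩
        · cases hx5; exact ⟨Or.inr ⟨hx1, hx2⟩, hx4⟩
      · rintro ⟨hcov | ⟨h1, h2⟩, hocc'⟩
        · exact Or.inl ((hinv x).2 ⟨hcov, hocc'⟩)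
        · by_cases hcv : pvCovP covered x
          · exact Or.inl ((hinv x).2 ⟨hcv, hocc'⟩)
          · exact Or.inr ⟨x, ⟨⟨h1, h2, hcv⟩, hocc'⟩, rfl, trivial⟩
  · -- the sensor does not reach the row: both sides unchanged
    have hcA : ¬(level ≤ s.2 + d ∧ s.2 - d ≤ level) := by
      intro hca; apply hc; rw [hoff, abs_le]; omega
    rw [if_neg hcA, if_neg hc]
    exact ⟨hout.symm, hnd, hok, hinv⟩

lemma pv_loop_eq (level : Int) (occupied : List (Int × Int))
    (hocc : ∀ p ∈ occupied, p.2 = level) :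
    ∀ (l : List (List (Int × Int))), (∀ y ∈ l, 2 ≤ y.length) →
    ∀ (pos covered out : List (Int × Int)), pos.Nodup → out = pos → pvOkCov covered →
    (∀ x, (x, level) ∈ pos ↔ pvCovP covered x ∧ (x, level) ∉ occupied) →
    l.foldl (pvStepA level occupied) pos =
      (l.foldl (pvStepB level (PySem.Set.ofList (occupied.map (fun p => p.1)))) (covered, out)).2 ∧
    (l.foldl (pvStepA level occupied) pos).Nodup := by
  intro l
  induction l with
  | nil => intro _ pos covered out hnd hout _ _; simpa [hout] using hnd
  | cons i t ih =>
    intro hl pos covered out hnd hout hok hinv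
    obtain ⟨h1, h2, h3, h4⟩ := pv_step_eq level occupied hocc i (hl i (by simp)) pos covered out hnd hout hok hinv
    simp only [List.foldl_cons]
    rcases hst : pvStepB level (PySem.Set.ofList (occupied.map (fun p => p.1))) (covered, out) i with ⟨c', o'⟩
    rw [hst] at h1 h3 h4 ⊢
    exact ih (fun y hy => hl y (by simp [hy])) _ c' o' h2 h1.symm h3 h4

-- ===== VERDICT (by name: the statement is the Claim_ definition above) =====
theorem calc_positions_spec : Claim_equal_calc_positions := by
  intro level data _hdom hpre
  unfold Spec_calc_positions calc_positions calc_positions_alt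
  have hocc := pvOcc_snd level data
  obtain ⟨h1, h2⟩ := pv_loop_eq level _ hocc data hpre PySem.Set.empty [] [] (by simp [PySem.Set.empty]) rfl
    ⟨by simp, List.Pairwise.nil⟩ (by intro x; simp [PySem.Set.empty, pvCovP])
  rw [h1] at h2 ⊢
  rw [PySem.Set.ofList_eq_self_of_nodup _ h2]
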